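-- pv_equiv track=rewrite | github.com/SlavaSubotskiy/sy-subtitles | tools/generate_map.py | _distribute_in_range
-- ===== SOURCE A (Python) =====
-- def _distribute_in_range(start_ms, end_ms, char_counts):
--     """Distribute a fixed time range across parts by character proportion."""
--     total = sum(char_counts)
--     if total == 0:
--         return [(start_ms, end_ms)] * len(char_counts)
--
--     dur = end_ms - start_ms
--     result = []
--     t = start_ms
--     for i, cc in enumerate(char_counts):
--         if i == len(char_counts) - 1:
--             result.append((t, end_ms))
--         else:
--             d = max(1, round(dur * cc / total))
--             result.append((t, t + d))
--             t += d
--     return result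
-- ===== SOURCE B (Python) =====
-- def _distribute_in_range(start_ms, end_ms, char_counts):
--     """Distribute a fixed time range across parts by character proportion.
--
--     Stateless index-based formulation: the start of part i is a closed form
--     (start_ms plus the sum of the rounded durations of all earlier parts),
--     recomputed from scratch per index -- no running accumulator, no threaded
--     state; the last part's end snaps to end_ms."""
--     total = sum(char_counts)
--     n = len(char_counts)
--     if total == 0:
--         return [(start_ms, end_ms)] * n
--     dur = end_ms - start_ms
--
--     def pos(i):
--         return start_ms + sum(max(1, round(dur * cc / total))
--                               for cc in char_counts[:i])
--
--     return [(pos(i), end_ms if i == n - 1 else pos(i + 1)) for i in range(n)]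
-- ===== Notes on version B (the rewrite author's own statement) =====
-- stated objective: alternative
-- what changed: Replaces A's single stateful loop that threads a running start time with a stateless per-index closed form: the start of part i is computed independently as start_ms plus the sum of the rounded durations of the first i parts, and the intervals are produced by mapping that position function over range(n); this trades A's O(n) running sum for an O(n^2) but state-free formulation.
import Mathlib
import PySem

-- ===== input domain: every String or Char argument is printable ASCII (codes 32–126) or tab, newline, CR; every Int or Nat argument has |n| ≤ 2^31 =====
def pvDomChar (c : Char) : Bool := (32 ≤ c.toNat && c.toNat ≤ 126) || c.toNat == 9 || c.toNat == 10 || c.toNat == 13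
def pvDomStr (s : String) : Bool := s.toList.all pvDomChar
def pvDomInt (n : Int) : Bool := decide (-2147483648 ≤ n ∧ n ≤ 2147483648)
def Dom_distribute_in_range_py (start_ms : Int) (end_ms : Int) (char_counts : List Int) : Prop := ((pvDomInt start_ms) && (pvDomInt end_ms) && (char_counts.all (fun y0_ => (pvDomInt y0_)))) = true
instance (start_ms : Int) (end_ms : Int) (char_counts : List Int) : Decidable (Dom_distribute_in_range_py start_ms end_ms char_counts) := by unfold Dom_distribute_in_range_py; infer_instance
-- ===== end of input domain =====

-- B replaces A's stateful running-sum loop with a stateless per-index closed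
-- form (start of part i = start_ms + sum of the first i rounded durations,
-- recomputed per index); objective: alternative decomposition, not faster.

-- Shared arithmetic helper used by BOTH ports (both Pythons compute the very same
-- expression round(dur * cc / total)).  It models Python's  round(p / t)  for
-- ints exactly: int/int true division is the correctly rounded (round-to-nearest,
-- ties-to-even) IEEE-754 double of p/t, and round() then rounds that double
-- half-to-even to an integer.  pvRneDiv N D is round-half-even of N/D.
def pvRneDiv (N D : Nat) : Nat :=
  let q := N / D
  let r := N % D
  if 2 * r < D then q
  else if D < 2 * r then q + 1
  else if q % 2 = 0 then q else q + 1

-- round(p / t) for Python ints, t ≠ 0 (exact for |p/t| well below 2^1024, which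
-- covers every call the ports make).
def pvRoundDiv (p t : Int) : Int :=
  let s : Int := if (p < 0) ≠ (t < 0) then -1 else 1
  let a := p.natAbs
  let b := t.natAbs
  if a = 0 then 0
  else
    -- choose exponent e with a/(b·2^e) ∈ (2^52, 2^54); mantissa by one rounding
    let e0 : Int := (Nat.log2 a : Int) - (Nat.log2 b : Int) - 53
    let mAt : Int → Nat := fun e =>
      if 0 ≤ e then pvRneDiv a (b * 2 ^ e.toNat) else pvRneDiv (a * 2 ^ (-e).toNat) b
    let m0 := mAt e0
    let me : Nat × Int := if 2 ^ 53 ≤ m0 then (mAt (e0 + 1), e0 + 1) else (m0, e0)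
    -- the double is me.1 · 2^me.2 ; round it half-to-even to an integer
    let v : Nat := if 0 ≤ me.2 then me.1 * 2 ^ me.2.toNat else pvRneDiv me.1 (2 ^ (-me.2).toNat)
    s * (v : Int)

-- ===== PORT A =====
-- the for-loop of A: state (i, t), appends become cons
def distAuxA (e dur total n : Int) (i t : Int) : List Int → List (Int × Int)
  | [] => []
  | cc :: rest =>
    if i == n - 1 then (t, e) :: distAuxA e dur total n (i + 1) t rest
    else
      let d := max 1 (pvRoundDiv (dur * cc) total)
      (t, t + d) :: distAuxA e dur total n (i + 1) (t + d) rest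

def distribute_in_range_py (start_ms : Int) (end_ms : Int) (char_counts : List Int) : List (Int × Int) :=
  let total := char_counts.sum
  if total == 0 then List.replicate char_counts.length (start_ms, end_ms)
  else distAuxA end_ms (end_ms - start_ms) total (char_counts.length : Int) 0 start_ms char_counts

-- ===== PORT B =====
-- pos(i): start_ms plus the sum of the rounded durations of the first i parts
-- (char_counts[:i] is PySem.List.slice; i comes from range(n), so 0 ≤ i)
def pvPosB (s dur total : Int) (ccs : List Int) (i : Int) : Int :=
  s + ((PySem.List.slice ccs none (some i)).map
        (fun cc => max 1 (pvRoundDiv (dur * cc) total))).sum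

def distribute_in_range_py_alt (start_ms : Int) (end_ms : Int) (char_counts : List Int) : List (Int × Int) :=
  let total := char_counts.sum
  let n := char_counts.length
  if total == 0 then List.replicate n (start_ms, end_ms)
  else
    let dur := end_ms - start_ms
    (PySem.List.pyRange 0 (n : Int) 1).map (fun i =>
      (pvPosB start_ms dur total char_counts i,
       if i == (n : Int) - 1 then end_ms
       else pvPosB start_ms dur total char_counts (i + 1)))

-- ===== PRECONDITION & SPEC =====
def Spec_distribute_in_range_py (start_ms : Int) (end_ms : Int) (char_counts : List Int) (out : List (Int × Int)) : Prop := out = distribute_in_range_py_alt start_ms end_ms char_counts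
instance (start_ms : Int) (end_ms : Int) (char_counts : List Int) (out : List (Int × Int)) : Decidable (Spec_distribute_in_range_py start_ms end_ms char_counts out) := by unfold Spec_distribute_in_range_py; infer_instance

-- ===== CLAIM (what is proved, stated in full; the proofs are below) =====
def Claim_equal_distribute_in_range_py : Prop := ∀ (start_ms : Int) (end_ms : Int) (char_counts : List Int), Dom_distribute_in_range_py start_ms end_ms char_counts → Spec_distribute_in_range_py start_ms end_ms char_counts (distribute_in_range_py start_ms end_ms char_counts)

-- ===== LEMMAS AND PROOFS =====

-- common reference shape: the list of intervals both programs produce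
def goSpec (e dur total t : Int) : List Int → List (Int × Int)
  | [] => []
  | [_] => [(t, e)]
  | c :: c2 :: rest =>
    let d := max 1 (pvRoundDiv (dur * c) total)
    (t, t + d) :: goSpec e dur total (t + d) (c2 :: rest)

theorem auxA_eq_go (e dur total : Int) :
    ∀ (xs : List Int) (i t n : Int), n = i + (xs.length : Int) →
      distAuxA e dur total n i t xs = goSpec e dur total t xs := by
  intro xs
  induction xs with
  | nil => intro i t n _; rfl
  | cons cc rest ih =>
    intro i t n hn
    cases rest with
    | nil =>
      have : (i == n - 1) = true := by simp at hn ⊢; omega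
      simp [distAuxA, goSpec, this]
    | cons c2 rs =>
      have : (i == n - 1) = false := by
        simp [List.length_cons] at hn ⊢
        omega
      simp only [distAuxA, goSpec, this, Bool.false_eq_true, if_false]
      refine congrArg _ ?_
      exact ih (i + 1) _ n (by simp [List.length_cons] at hn ⊢; omega)

-- pvPosB at a nonnegative (Nat-cast) index is start + sum over the prefix
theorem pvPosB_natCast (s dur total : Int) (ccs : List Int) (k : Nat) :
    pvPosB s dur total ccs (k : Int)
      = s + ((ccs.take k).map (fun cc => max 1 (pvRoundDiv (dur * cc) total))).sum := by
  simp only [pvPosB, PySem.List.slice_to_natCast]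

-- B's comprehension, re-indexed over List.range, equals the reference shape
theorem mapF_range (e dur total : Int) :
    ∀ (ccs : List Int) (s : Int), ccs ≠ [] →
      (List.range ccs.length).map (fun (k : Nat) =>
        ((pvPosB s dur total ccs (k : Int) : Int),
         if ((k : Int) == (ccs.length : Int) - 1) = true then e
         else pvPosB s dur total ccs ((k : Int) + 1)))
      = goSpec e dur total s ccs := by
  intro ccs
  induction ccs with
  | nil => intro s h; exact absurd rfl h
  | cons c rest ih =>
    intro s _
    cases rest with
    | nil =>
      have h0 : pvPosB s dur total [c] ((0 : Nat) : Int) = s := by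
        rw [pvPosB_natCast]; simp
      simp only [List.length_cons, List.length_nil, List.range_succ, List.range_zero,
        List.nil_append, List.map_cons, List.map_nil, goSpec]
      norm_num at h0 ⊢
      exact h0
    | cons c2 rs =>
      set D := max 1 (pvRoundDiv (dur * c) total) with hD
      rw [show List.range (c :: c2 :: rs).length
            = 0 :: List.map Nat.succ (List.range (c2 :: rs).length)
          from List.range_succ_eq_map, List.map_cons]
      have hhead :
          (pvPosB s dur total (c :: c2 :: rs) ((0 : Nat) : Int),
           if (((0 : Nat) : Int) == ((c :: c2 :: rs).length : Int) - 1) = true then e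
           else pvPosB s dur total (c :: c2 :: rs) (((0 : Nat) : Int) + 1))
          = (s, s + D) := by
        -- head: position 0 is s; 0 is never the last index of a 2-or-more list
        have hne : ((((0 : Nat) : Int)) == ((c :: c2 :: rs).length : Int) - 1) = false := by
          simp [List.length_cons]
          omega
        have h1 : (((0 : Nat) : Int)) + 1 = ((1 : Nat) : Int) := by norm_num
        rw [hne]
        simp only [Bool.false_eq_true, if_false, h1, pvPosB_natCast]
        simp [hD]
      have htail :
          (List.range (c2 :: rs).length).map
            ((fun k : Nat =>
              (pvPosB s dur total (c :: c2 :: rs) (k : Int),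
               if ((k : Int) == ((c :: c2 :: rs).length : Int) - 1) = true then e
               else pvPosB s dur total (c :: c2 :: rs) ((k : Int) + 1))) ∘ Nat.succ)
          = (List.range (c2 :: rs).length).map (fun k : Nat =>
              (pvPosB (s + D) dur total (c2 :: rs) (k : Int),
               if ((k : Int) == ((c2 :: rs).length : Int) - 1) = true then e
               else pvPosB (s + D) dur total (c2 :: rs) ((k : Int) + 1))) := by
        refine List.map_congr_left ?_
        intro k _
        simp only [Function.comp_apply]
        have hcond : (((Nat.succ k : Nat) : Int) == ((c :: c2 :: rs).length : Int) - 1)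
            = (((k : Nat) : Int) == ((c2 :: rs).length : Int) - 1) := by
          simp
        have hpos1 : pvPosB s dur total (c :: c2 :: rs) ((Nat.succ k : Nat) : Int)
            = pvPosB (s + D) dur total (c2 :: rs) (k : Int) := by
          rw [pvPosB_natCast, pvPosB_natCast, List.take_succ_cons]
          simp [hD]; ring
        have hpos2 : pvPosB s dur total (c :: c2 :: rs) (((Nat.succ k : Nat) : Int) + 1)
            = pvPosB (s + D) dur total (c2 :: rs) ((k : Int) + 1) := by
          have e1 : ((Nat.succ k : Nat) : Int) + 1 = ((Nat.succ (Nat.succ k) : Nat) : Int) := by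
            push_cast
            ring
          have e2 : ((k : Int)) + 1 = ((Nat.succ k : Nat) : Int) := by
            push_cast
            ring
          rw [e1, e2, pvPosB_natCast, pvPosB_natCast, List.take_succ_cons]
          simp [hD]; ring
        rw [hcond, hpos1]
        by_cases hb : (((k : Nat) : Int) == ((c2 :: rs).length : Int) - 1) = true
        · simp only [hb, if_true]
        · simp only [eq_false_of_ne_true hb, Bool.false_eq_true, if_false, hpos2]
      rw [hhead, List.map_map, htail, ih (s + D) (by simp)]
      simp [goSpec, hD]

theorem distribute_in_range_py_spec : Claim_equal_distribute_in_range_py := by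
  unfold Claim_equal_distribute_in_range_py
  intro start_ms end_ms char_counts _
  unfold Spec_distribute_in_range_py
  unfold distribute_in_range_py distribute_in_range_py_alt
  by_cases h : char_counts.sum = 0
  · simp [h]
  · have hne : char_counts ≠ [] := by
      intro hnil; rw [hnil] at h; exact h rfl
    have hb : (char_counts.sum == 0) = false := by simp [h]
    simp only [hb, Bool.false_eq_true, if_false]
    rw [auxA_eq_go end_ms (end_ms - start_ms) char_counts.sum char_counts 0 start_ms
        (char_counts.length : Int) (by simp)]
    rw [PySem.List.pyRange_one]
    have hl : (((char_counts.length : Int)) - 0).toNat = char_counts.length := by simp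
    rw [hl, List.map_map]
    rw [show ((fun i => (pvPosB start_ms (end_ms - start_ms) char_counts.sum char_counts i,
        if (i == (char_counts.length : Int) - 1) = true then end_ms
        else pvPosB start_ms (end_ms - start_ms) char_counts.sum char_counts (i + 1))) ∘
        (fun k : Nat => (0 : Int) + (k : Int)))
      = (fun k : Nat =>
          (pvPosB start_ms (end_ms - start_ms) char_counts.sum char_counts (k : Int),
           if ((k : Int) == (char_counts.length : Int) - 1) = true then end_ms
           else pvPosB start_ms (end_ms - start_ms) char_counts.sum char_counts ((k : Int) + 1)))
      from by funext k; simp]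
    exact (mapF_range end_ms (end_ms - start_ms) char_counts.sum char_counts start_ms hne).symm
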